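-- pv_equiv track=rewrite | github.com/IKdotShark/Uir_2023 | lab2/arrays.py | zmeika_nxn
-- ===== SOURCE A (Python) =====
-- def zmeika_nxn(n):
--     arr1 = [0] * n
--     for i in range(n):
--         arr1[i] = [0] * n
--     for i in range(n):
--         for j in range(n):
--             if (i % 2 == 0):
--                 arr1[i][j] = n * i + j + 1
--             else:
--                 arr1[i][j] = n * (i + 1) - j
--     return arr1
-- ===== SOURCE B (Python) =====
-- def zmeika_nxn(n):
--     result = []
--     counter = 1
--     for i in range(n):
--         row = list(range(counter, counter + n))
--         counter += n
--         if i % 2 == 1: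
--             row.reverse()
--         result.append(row)
--     return result
-- ===== Notes on version B (the rewrite author's own statement) =====
-- stated objective: idiomatic
-- what changed: B builds each row from a running counter as a contiguous range and reverses odd rows, instead of A's preallocated zero matrix mutated cell by cell with a parity-dependent closed-form index formula.
import Mathlib
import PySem

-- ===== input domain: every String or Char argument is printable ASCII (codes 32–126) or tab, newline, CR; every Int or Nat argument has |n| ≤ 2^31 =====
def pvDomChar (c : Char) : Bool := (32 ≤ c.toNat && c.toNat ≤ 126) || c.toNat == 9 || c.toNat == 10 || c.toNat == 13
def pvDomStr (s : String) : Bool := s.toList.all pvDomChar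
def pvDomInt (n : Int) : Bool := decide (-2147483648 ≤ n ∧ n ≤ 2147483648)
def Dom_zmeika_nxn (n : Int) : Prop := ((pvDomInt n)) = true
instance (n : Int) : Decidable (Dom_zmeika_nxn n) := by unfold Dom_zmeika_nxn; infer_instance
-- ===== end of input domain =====

-- B numbers each row with a running counter and reverses odd rows, replacing A's
-- mutated zero matrix filled cell by cell from a parity-dependent index formula; same O(n^2) cost, plainer structure.


-- ===== PORT A =====
-- Python's '[0] * n' placeholder list is typed with '#[]' placeholders; the first loop
-- overwrites every placeholder with a zero row, so this is exact. Python lists are modelled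
-- as Lean Arrays (same O(1) in-place 'arr1[i] = ...' / 'arr1[i][j] = ...' mutation); the loop
-- indices come from range(n), hence are nonnegative, so '.toNat' is exact here.
def zmeika_nxn (n : Int) : List (List Int) :=
  let arr1 : Array (Array Int) :=
    (PySem.List.pyRange 0 n 1).foldl
      (fun a i => a.setIfInBounds i.toNat (PySem.List.pyRepeat [(0 : Int)] n).toArray)
      (PySem.List.pyRepeat [(#[] : Array Int)] n).toArray
  let arr2 :=
    (PySem.List.pyRange 0 n 1).foldl
      (fun a i =>
        (PySem.List.pyRange 0 n 1).foldl
          (fun a j =>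
            a.modify i.toNat (fun row =>
              row.setIfInBounds j.toNat
                (if PySem.Int.mod i 2 = 0 then n * i + j + 1 else n * (i + 1) - j)))
          a)
      arr1
  arr2.toList.map Array.toList

-- ===== PORT B =====
-- loop body of Source B: build the row from the counter, advance the counter, reverse odd rows, append
def pvAltStep (n : Int) (st : List (List Int) × Int) (i : Int) : List (List Int) × Int :=
  let row := PySem.List.pyRange st.2 (st.2 + n) 1
  let row' := if PySem.Int.mod i 2 = 1 then row.reverse else row
  (st.1 ++ [row'], st.2 + n)

def zmeika_nxn_alt (n : Int) : List (List Int) :=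
  ((PySem.List.pyRange 0 n 1).foldl (pvAltStep n) (([], 1) : List (List Int) × Int)).1

-- ===== PRECONDITION & SPEC =====
def Spec_zmeika_nxn (n : Int) (out : List (List Int)) : Prop := out = zmeika_nxn_alt n
instance (n : Int) (out : List (List Int)) : Decidable (Spec_zmeika_nxn n out) := by unfold Spec_zmeika_nxn; infer_instance

-- ===== CLAIM (what is proved, stated in full; the proofs are below) =====
def Claim_equal_zmeika_nxn : Prop := ∀ (n : Int), Dom_zmeika_nxn n → Spec_zmeika_nxn n (zmeika_nxn n)

-- ===== LEMMAS AND PROOFS =====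

-- getD after a single set
lemma pv_getD_set {α : Type} (l : List α) (i j : Nat) (a d : α) :
    (l.set i a).getD j d = if j = i ∧ j < l.length then a else l.getD j d := by
  rcases lt_or_ge j l.length with hj | hj
  · rw [List.getD_eq_getElem _ _ (by simpa using hj)]
    rw [List.getElem_set]
    by_cases h : i = j
    · subst h; simp [hj]
    · rw [if_neg h, if_neg (by tauto), List.getD_eq_getElem _ _ hj]
  · rw [List.getD_eq_default _ _ (by simpa using hj), List.getD_eq_default _ _ hj,
      if_neg (by omega)]

-- a fold of element assignments preserves the length
lemma pv_length_foldl_set {α : Type} (p : Nat → Nat) (F : List α → Nat → α) :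
    ∀ (l : List Nat) (xs : List α),
      (l.foldl (fun a x => a.set (p x) (F a x)) xs).length = xs.length := by
  intro l
  induction l with
  | nil => intro xs; rfl
  | cons i t ih => intro xs; rw [List.foldl_cons, ih]; simp

-- getD after a fold of assignments at pairwise-distinct indices
lemma pv_getD_foldl_set {α : Type} (G : Nat → α → α) (d : α) (k : Nat) :
    ∀ (l : List Nat), l.Nodup → ∀ (xs : List α),
      (l.foldl (fun a i => a.set i (G i (a.getD i d))) xs).getD k d
        = if k ∈ l ∧ k < xs.length then G k (xs.getD k d) else xs.getD k d := by
  intro l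
  induction l with
  | nil => intro _ xs; simp
  | cons i t ih =>
    intro hnd xs
    rcases List.nodup_cons.mp hnd with ⟨hit, hndt⟩
    rw [List.foldl_cons, ih hndt]
    have hlen : (xs.set i (G i (xs.getD i d))).length = xs.length := by simp
    rw [hlen, pv_getD_set]
    by_cases hk : k < xs.length
    · by_cases hki : k = i
      · subst hki; simp [hk, hit]
      · simp [hki, hk, List.mem_cons]
    · simp [hk]

-- 'for i in range(m): xs[i] = G(i, xs[i])' on a list of length m is a map over range m
lemma pv_foldl_set_range_eq_map {α : Type} (G : Nat → α → α) (d : α) (m : Nat)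
    (xs : List α) (h : xs.length = m) :
    (List.range m).foldl (fun a i => a.set i (G i (a.getD i d))) xs
      = (List.range m).map (fun k => G k (xs.getD k d)) := by
  apply List.ext_getElem
  · exact Eq.trans (pv_length_foldl_set (fun x => x) (fun a i => G i (a.getD i d)) (List.range m) xs) (by simp [h])
  · intro k h1 h2
    have hk : k < m := by simpa using h2
    simp only [List.getElem_map, List.getElem_range]
    rw [← List.getD_eq_getElem _ d h1]
    rw [pv_getD_foldl_set G d k (List.range m) List.nodup_range xs]
    simp [hk, h]

-- value-only variant (assigned value ignores the old entry)
lemma pv_foldl_set_range_const {α : Type} (z : α) (d : α) (m : Nat) (xs : List α)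
    (h : xs.length = m) :
    (List.range m).foldl (fun a i => a.set i z) xs = (List.range m).map (fun _ => z) :=
  pv_foldl_set_range_eq_map (fun _ _ => z) d m xs h

lemma pv_foldl_set_range_eq_map_app {α : Type} (f : Nat → α) (d : α) (m : Nat) (xs : List α)
    (h : xs.length = m) :
    (List.range m).foldl (fun a j => a.set j (f j)) xs = (List.range m).map f :=
  pv_foldl_set_range_eq_map (fun j _ => f j) d m xs h

-- A's inner loop mutates only row i: it is one set of row i to a row-level fold
lemma pv_row_fold {α : Type} (i : Nat) (w : Nat → α) (d : List α) :
    ∀ (l : List Nat) (a : List (List α)), i < a.length →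
      l.foldl (fun a j => a.set i ((a.getD i d).set j (w j))) a
        = a.set i (l.foldl (fun r j => r.set j (w j)) (a.getD i d)) := by
  intro l
  induction l with
  | nil =>
    intro a ha
    rw [List.foldl_nil, List.foldl_nil]
    apply List.ext_getElem
    · simp
    · intro j h1 h2
      rw [List.getElem_set]
      by_cases hij : i = j
      · subst hij; rw [if_pos rfl, List.getD_eq_getElem _ _ ha]
      · rw [if_neg hij]
  | cons j t ih =>
    intro a ha
    rw [List.foldl_cons, List.foldl_cons]
    rw [ih _ (by simpa using ha)]
    have hg : (a.set i ((a.getD i d).set j (w j))).getD i d = (a.getD i d).set j (w j) := by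
      rw [pv_getD_set]; simp [ha]
    rw [hg, List.set_set]

-- getD after A's outer loop over distinct in-range row indices
lemma pv_outer_getD {α : Type} (v : Nat → Nat → α) (d : List α) (m : Nat) (k : Nat) :
    ∀ (l : List Nat), l.Nodup → (∀ i ∈ l, i < m) → ∀ (a : List (List α)), a.length = m →
      ((l.foldl (fun a i => (List.range m).foldl
          (fun a j => a.set i ((a.getD i d).set j (v i j))) a) a).getD k d)
        = if k ∈ l ∧ k < m
          then (List.range m).foldl (fun r j => r.set j (v k j)) (a.getD k d)
          else a.getD k d := by
  intro l
  induction l with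
  | nil => intro _ _ a _; simp
  | cons i t ih =>
    intro hnd hlt a ha
    rcases List.nodup_cons.mp hnd with ⟨hit, hndt⟩
    have hi : i < m := hlt i List.mem_cons_self
    rw [List.foldl_cons]
    rw [pv_row_fold i (fun j => v i j) d (List.range m) a (by omega)]
    rw [ih hndt (fun x hx => hlt x (List.mem_cons_of_mem _ hx)) _ (by simp [ha])]
    rw [pv_getD_set]
    simp only [ha]
    by_cases hk : k < m
    · by_cases hki : k = i
      · subst hki; simp [hk, hit]
      · simp [hki, hk, List.mem_cons]
    · simp [hk]

lemma pv_outer_length {α : Type} (v : Nat → Nat → α) (d : List α) (m : Nat) :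
    ∀ (l : List Nat) (xs : List (List α)),
      (l.foldl (fun a i => (List.range m).foldl
        (fun a j => a.set i ((a.getD i d).set j (v i j))) a) xs).length = xs.length := by
  intro l
  induction l with
  | nil => intro xs; rfl
  | cons i t ih =>
    intro xs
    rw [List.foldl_cons, ih]
    exact pv_length_foldl_set (fun _ => i) (fun a j => (a.getD i d).set j (v i j)) (List.range m) xs

-- A's two nested loops in Nat-index form
lemma pv_A_nat {α : Type} (v : Nat → Nat → α) (d : List α) (m : Nat) (xs : List (List α)) (h : xs.length = m) :
    (List.range m).foldl
        (fun a i => (List.range m).foldl (fun a j => a.set i ((a.getD i d).set j (v i j))) a) xs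
      = (List.range m).map (fun k =>
          (List.range m).foldl (fun r j => r.set j (v k j)) (xs.getD k d)) := by
  apply List.ext_getElem
  · exact Eq.trans (pv_outer_length v d m (List.range m) xs) (by simp [h])
  · intro k h1 h2
    have hk : k < m := by simpa using h2
    simp only [List.getElem_map, List.getElem_range]
    rw [← List.getD_eq_getElem _ d h1]
    rw [pv_outer_getD v d m k (List.range m) List.nodup_range (fun i hi => List.mem_range.mp hi) xs h]
    simp [hk]

-- a projection commuting with each step commutes with the whole fold
lemma pv_foldl_hom {β γ δ : Type} (proj : β → δ) (f : β → γ → β) (g : δ → γ → δ)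
    (h : ∀ a x, proj (f a x) = g (proj a) x) :
    ∀ (l : List γ) (init : β), proj (l.foldl f init) = l.foldl g (proj init) := by
  intro l
  induction l with
  | nil => intro init; rfl
  | cons x t ih => intro init; rw [List.foldl_cons, List.foldl_cons, ih, h]

-- the Array-level cell assignment seen through toList
lemma pv_proj_modify (a : Array (Array Int)) (i j : Nat) (v : Int) :
    ((a.modify i (fun row => row.setIfInBounds j v)).toList.map Array.toList)
      = (a.toList.map Array.toList).set i
          (((a.toList.map Array.toList).getD i []).set j v) := by
  rw [Array.toList_modify, List.modify_eq_set, List.map_set, Array.toList_setIfInBounds]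
  have hd : (default : Array Int).toList = [] := rfl
  cases h : a.toList[i]? with
  | none => simp [List.getD_eq_getElem?_getD, List.getElem?_map, h, hd]
  | some r => simp [List.getD_eq_getElem?_getD, List.getElem?_map, h]

-- A's nested loops on Arrays, seen through toList, are the List-level nested loops
lemma pv_A_arr_to_list (v : Nat → Nat → Int) (m : Nat) (init : Array (Array Int)) :
    (((List.range m).foldl (fun a i => (List.range m).foldl
        (fun a j => a.modify i (fun row => row.setIfInBounds j (v i j))) a) init).toList.map Array.toList)
      = (List.range m).foldl (fun a i => (List.range m).foldl
          (fun a j => a.set i ((a.getD i []).set j (v i j))) a) (init.toList.map Array.toList) :=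
  pv_foldl_hom (fun a => a.toList.map Array.toList)
    (fun a i => (List.range m).foldl
      (fun a j => a.modify i (fun row => row.setIfInBounds j (v i j))) a)
    (fun a i => (List.range m).foldl
      (fun a j => a.set i ((a.getD i []).set j (v i j))) a)
    (fun a i => pv_foldl_hom (fun a => a.toList.map Array.toList)
      (fun a j => a.modify i (fun row => row.setIfInBounds j (v i j)))
      (fun a j => a.set i ((a.getD i []).set j (v i j)))
      (fun a' j => pv_proj_modify a' i j (v i j)) (List.range m) a)
    (List.range m) init

lemma pv_A_init_to_list (m : Nat) (z : List Int) (init : Array (Array Int)) :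
    (((List.range m).foldl (fun a i => a.setIfInBounds i z.toArray) init).toList.map Array.toList)
      = (List.range m).foldl (fun a i => a.set i z) (init.toList.map Array.toList) :=
  pv_foldl_hom (fun a => a.toList.map Array.toList)
    (fun a i => a.setIfInBounds i z.toArray)
    (fun a i => a.set i z)
    (fun a i => by simp) (List.range m) init

-- closed form of A
lemma pv_A_eq (n : Int) :
    zmeika_nxn n = (List.range n.toNat).map (fun (k : Nat) =>
      (List.range n.toNat).map (fun (j : Nat) =>
        if PySem.Int.mod (k : Int) 2 = 0 then n * k + j + 1 else n * (k + 1) - j)) := by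
  unfold zmeika_nxn
  simp only [PySem.List.pyRange_one, sub_zero, List.foldl_map, zero_add, Int.toNat_natCast,
    PySem.List.pyRepeat_singleton]
  refine Eq.trans (pv_A_arr_to_list
    (fun i j => if PySem.Int.mod (i : Int) 2 = 0 then n * i + j + 1 else n * (i + 1) - j)
    n.toNat _) ?_
  rw [pv_A_init_to_list]
  have hinit : (((List.replicate n.toNat (#[] : Array Int)).toArray).toList.map Array.toList)
      = List.replicate n.toNat ([] : List Int) := by simp
  rw [hinit]
  have hxslen : ((List.range n.toNat).foldl
      (fun a i => a.set i (List.replicate n.toNat (0 : Int)))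
      (List.replicate n.toNat ([] : List Int))).length = n.toNat :=
    Eq.trans (pv_length_foldl_set (fun x => x) (fun _ _ => List.replicate n.toNat (0 : Int))
      (List.range n.toNat) (List.replicate n.toNat ([] : List Int))) (by simp)
  refine Eq.trans (pv_A_nat
    (fun i j => if PySem.Int.mod (i : Int) 2 = 0 then n * i + j + 1 else n * (i + 1) - j)
    ([] : List Int) n.toNat
    ((List.range n.toNat).foldl
      (fun a i => a.set i (List.replicate n.toNat (0 : Int)))
      (List.replicate n.toNat ([] : List Int)))
    hxslen) ?_
  rw [pv_foldl_set_range_const (List.replicate n.toNat (0 : Int)) ([] : List Int) n.toNat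
    (List.replicate n.toNat ([] : List Int)) (by simp)]
  apply List.map_congr_left
  intro k hk
  have hk' : k < n.toNat := List.mem_range.mp hk
  have hz : (((List.range n.toNat).map (fun _ => List.replicate n.toNat (0 : Int))).getD k [])
      = List.replicate n.toNat (0 : Int) := by
    rw [List.getD_eq_getElem _ _ (by simp [hk'])]; simp
  rw [hz]
  exact pv_foldl_set_range_eq_map_app
    (fun j => if PySem.Int.mod (k : Int) 2 = 0 then n * k + j + 1 else n * (k + 1) - j)
    (0 : Int) n.toNat (List.replicate n.toNat (0 : Int)) (by simp)

-- B's loop with the counter invariant counter = n*a + 1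
lemma pv_B_loop (n : Int) : ∀ (c : Nat) (a : Int), (n - a).toNat = c → ∀ (res : List (List Int)),
    ((PySem.List.pyRange a n 1).foldl (pvAltStep n) (res, n * a + 1)).1
      = res ++ (PySem.List.pyRange a n 1).map (fun i =>
          if PySem.Int.mod i 2 = 1 then (PySem.List.pyRange (n * i + 1) (n * i + 1 + n) 1).reverse
          else PySem.List.pyRange (n * i + 1) (n * i + 1 + n) 1) := by
  intro c
  induction c with
  | zero =>
    intro a hc res
    rw [PySem.List.pyRange_one_eq_nil (by omega)]
    simp
  | succ c ih =>
    intro a hc res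
    have hlt : a < n := by omega
    rw [PySem.List.pyRange_one_cons hlt, List.foldl_cons, List.map_cons]
    have hstep : pvAltStep n (res, n * a + 1) a
        = (res ++ [if PySem.Int.mod a 2 = 1
              then (PySem.List.pyRange (n * a + 1) (n * a + 1 + n) 1).reverse
              else PySem.List.pyRange (n * a + 1) (n * a + 1 + n) 1],
            n * (a + 1) + 1) := by
      simp only [pvAltStep]
      rw [show n * a + 1 + n = n * (a + 1) + 1 by ring]
    rw [hstep, ih (a + 1) (by omega)]
    simp

-- closed form of B
lemma pv_B_eq (n : Int) :
    zmeika_nxn_alt n = (List.range n.toNat).map (fun (k : Nat) =>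
      if PySem.Int.mod (k : Int) 2 = 1
        then (PySem.List.pyRange (n * k + 1) (n * k + 1 + n) 1).reverse
        else PySem.List.pyRange (n * k + 1) (n * k + 1 + n) 1) := by
  unfold zmeika_nxn_alt
  conv_lhs => rw [show (([] : List (List Int)), (1 : Int)) = (([] : List (List Int)), n * 0 + 1) by norm_num]
  rw [pv_B_loop n (n - 0).toNat 0 rfl [], List.nil_append]
  rw [PySem.List.pyRange_one 0 n, List.map_map]
  simp only [sub_zero]
  apply List.map_congr_left
  intro k _
  simp only [Function.comp_apply, zero_add]

-- ===== VERDICT (by name: the statement is the Claim_ definition above) =====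
theorem zmeika_nxn_spec : Claim_equal_zmeika_nxn := by
  intro n _
  unfold Spec_zmeika_nxn
  rw [pv_A_eq, pv_B_eq]
  apply List.map_congr_left
  intro k hk
  have hk' : k < n.toNat := List.mem_range.mp hk
  have hmn : ((n.toNat : Nat) : Int) = n := by omega
  have hmod : PySem.Int.mod (k : Int) 2 = ((k % 2 : Nat) : Int) := by
    exact_mod_cast PySem.Int.mod_natCast k 2
  have hrange : PySem.List.pyRange (n * k + 1) (n * k + 1 + n) 1
      = (List.range n.toNat).map (fun (t : Nat) => n * (k : Int) + 1 + (t : Int)) := by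
    rw [PySem.List.pyRange_one]
    have hd : n * (k : Int) + 1 + n - (n * (k : Int) + 1) = n := by ring
    rw [hd]
  rcases Nat.mod_two_eq_zero_or_one k with hp | hp
  · rw [hmod, hp, if_neg (by norm_num), hrange]
    apply List.map_congr_left
    intro j _
    rw [if_pos (by norm_num)]
    ring
  · rw [hmod, hp, if_pos (by norm_num), hrange]
    apply List.ext_getElem
    · simp
    · intro t h1 h2
      have ht : t < n.toNat := by simpa using h1
      simp only [List.getElem_map, List.getElem_range, List.getElem_reverse,
        List.length_map, List.length_range]
      rw [if_neg (by norm_num)]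
      have hsub : ((n.toNat - 1 - t : Nat) : Int) = n - 1 - (t : Int) := by omega
      rw [hsub]
      ring
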